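-- pv_equiv track=rewrite | github.com/VBMart/aoc2024 | day17/day17.py | make_num
-- ===== SOURCE A (Python) =====
-- def make_num(num):
--     res = []
--     for b1 in range(8):
--         b2 = b1 ^ 1
--         pow_b2 = 2 ** b2
--         for c in range(8):
--             b3 = b2 ^ c
--             b4 = b3 ^ 6
--             a = c * (2 ** pow_b2) + b1
--             if a % 8 != b1:
--                 continue
--             if b4 == num:
--                 res.append((a, b1, c))
--     return res
-- ===== SOURCE B (Python) =====
-- def make_num(num):
--     # b4 = (b1 ^ 1) ^ c ^ 6 == num uniquely determines c = b1 ^ 7 ^ num (possible only for 0 <= num < 8),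
--     # and a % 8 == b1 is exactly divisibility of the c * 2**(2**(b1^1)) term by 8.
--     if not (0 <= num < 8):
--         return []
--     return [(c * 2 ** (2 ** (b1 ^ 1)) + b1, b1, c)
--             for b1 in range(8)
--             for c in [b1 ^ 7 ^ num]
--             if c * 2 ** (2 ** (b1 ^ 1)) % 8 == 0]
-- ===== Notes on version B (the rewrite author's own statement) =====
-- stated objective: simpler
-- what changed: B removes A's inner 8-way scan over c: b4 = (b1^1)^c^6 == num has the unique solution c = b1^7^num (possible only when 0 <= num < 8), so B guards on the range once and builds the list with a single comprehension over b1, testing divisibility of the c*2**(2**(b1^1)) term by 8 instead of recomputing a % 8 == b1.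
import Mathlib
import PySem

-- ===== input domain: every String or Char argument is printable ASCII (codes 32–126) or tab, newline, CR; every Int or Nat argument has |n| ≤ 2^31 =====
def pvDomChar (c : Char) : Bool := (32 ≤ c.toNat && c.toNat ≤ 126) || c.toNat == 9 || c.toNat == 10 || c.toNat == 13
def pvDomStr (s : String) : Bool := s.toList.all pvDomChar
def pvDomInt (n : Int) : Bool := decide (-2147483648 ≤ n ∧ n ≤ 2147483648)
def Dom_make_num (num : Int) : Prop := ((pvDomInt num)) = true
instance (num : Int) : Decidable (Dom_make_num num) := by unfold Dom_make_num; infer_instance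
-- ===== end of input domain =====

-- B solves b2^c^6 == num for c directly and emits the triples with one comprehension over b1 (no inner scan): simpler, same values.

-- ===== PORT A =====
def make_num (num : Int) : List (Int × Int × Int) :=
  (PySem.List.pyRange 0 8 1).foldl (fun res b1 =>
    let b2 := PySem.Int.bxor b1 1
    let pow_b2 := (2 : Int) ^ b2.toNat   -- exponent b2 ∈ 0..7 is nonneg, so Nat-pow is exact
    (PySem.List.pyRange 0 8 1).foldl (fun res c =>
      let b3 := PySem.Int.bxor b2 c
      let b4 := PySem.Int.bxor b3 6
      let a := c * (2 : Int) ^ pow_b2.toNat + b1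
      if PySem.Int.mod a 8 ≠ b1 then res
      else if b4 = num then res ++ [(a, b1, c)] else res) res) []

-- ===== PORT B =====
def make_num_alt (num : Int) : List (Int × Int × Int) :=
  if ¬ (0 ≤ num ∧ num < 8) then []
  else
    (PySem.List.pyRange 0 8 1).filterMap (fun b1 =>
      let c := PySem.Int.bxor (PySem.Int.bxor b1 7) num
      let t := c * (2 : Int) ^ ((2 : Int) ^ (PySem.Int.bxor b1 1).toNat).toNat  -- exponents nonneg, Nat-pow exact
      if PySem.Int.mod t 8 = 0 then some (t + b1, b1, c) else none)

-- ===== PRECONDITION & SPEC =====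
def Spec_make_num (num : Int) (out : List (Int × Int × Int)) : Prop := out = make_num_alt num
instance (num : Int) (out : List (Int × Int × Int)) : Decidable (Spec_make_num num out) := by unfold Spec_make_num; infer_instance

-- ===== CLAIM (what is proved, stated in full; the proofs are below) =====
def Claim_equal_make_num : Prop := ∀ (num : Int), Dom_make_num num → Spec_make_num num (make_num num)

-- ===== LEMMAS AND PROOFS =====

lemma pvRange8 : PySem.List.pyRange 0 8 1 = [0, 1, 2, 3, 4, 5, 6, 7] := by decide

lemma pvFoldlFixed {α β : Type} (f : β → α → β) (l : List α) (b : β)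
    (h : ∀ b a, a ∈ l → f b a = b) : l.foldl f b = b := by
  induction l generalizing b with
  | nil => rfl
  | cons x xs ih => simp only [List.foldl_cons, h b x (by simp)]; exact ih b fun b a ha => h b a (by simp [ha])

-- Outside 0 ≤ num < 8 both programs return []: A's b4 is always one of 0..7.
lemma make_num_out (num : Int) (h : ¬ (0 ≤ num ∧ num < 8)) : make_num num = [] := by
  simp only [make_num, pvRange8]
  apply pvFoldlFixed; intro res b1 hb1
  apply pvFoldlFixed; intro res' c hc
  dsimp only
  split_ifs with h1 h2
  · rfl
  · exfalso
    fin_cases hb1 <;> fin_cases hc <;> simp [PySem.Int.bxor] at h2 <;> omega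
  · rfl

-- ===== VERDICT (by name: the statement is the Claim_ definition above) =====
theorem make_num_spec : Claim_equal_make_num := by
  intro num _
  unfold Spec_make_num
  by_cases h : 0 ≤ num ∧ num < 8
  · obtain ⟨h0, h1⟩ := h
    interval_cases num <;> decide
  · rw [make_num_out num h]
    simp [make_num_alt, h]
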